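-- pv_equiv track=rewrite | github.com/jonunno/projecteuler | p35/p35.py | make_rotations
-- ===== SOURCE A (Python) =====
-- def make_rotations(n):
--     # returns a list with all rotations of digits in n
--     n_str = str(n)
--
--     results = []
--
--     # the first result is n itself
--     results.append(n_str)
--
--     # now do the rotations
--     for i in range(0, len(n_str) - 1):
--         results.append(make_rotation(results[i]))
--
--     # results is currently a list of strings, convert results to a list of ints
--     for i in range(0, len(results)):
--         results[i] = int(results[i])
--     return results
--
-- def make_rotation(n):
--     # rotates the digits in n a single spot
--     result = []
--     result.append(n[-1])
--     for i in range(0, len(n)-1):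
--         result.append(n[i])
--     return ''.join(result)
-- ===== SOURCE B (Python) =====
-- def make_rotations(n):
--     # returns a list with all rotations of digits in n
--     s = str(n)
--     return [int(s[-i:] + s[:-i]) for i in range(len(s))]
-- ===== Notes on version B (the rewrite author's own statement) =====
-- stated objective: simpler
-- what changed: Each rotation is computed independently from the original string by slicing (s[-i:]+s[:-i]) in one comprehension, instead of chaining a helper that rebuilds each rotation character-by-character from the previous result and then converting in a second pass.
import Mathlib
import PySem

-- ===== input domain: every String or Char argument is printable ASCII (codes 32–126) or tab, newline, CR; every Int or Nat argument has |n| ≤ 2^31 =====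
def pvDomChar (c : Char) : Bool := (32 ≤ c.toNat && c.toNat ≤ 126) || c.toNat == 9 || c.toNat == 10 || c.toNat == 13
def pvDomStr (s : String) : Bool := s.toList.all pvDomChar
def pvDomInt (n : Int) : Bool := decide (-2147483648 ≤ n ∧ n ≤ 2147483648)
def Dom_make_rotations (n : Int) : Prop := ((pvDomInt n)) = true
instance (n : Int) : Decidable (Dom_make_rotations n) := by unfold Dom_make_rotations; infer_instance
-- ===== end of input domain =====

-- B computes every rotation independently from the original digit string by slicing,
-- in one comprehension, instead of A's chain where each rotation is rebuilt
-- character-by-character from the previous one and converted in a second pass (objective: simpler).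

-- ===== PORT A =====
-- port of make_rotation: result = [n[-1]]; for i in range(0, len(n)-1): result.append(n[i]); ''.join(result)
def make_rotation_port (cs : List Char) : List Char :=
  let result : List Char := [PySem.List.pyGetD cs (-1) ' ']
  let result := (PySem.List.pyRange 0 (PySem.List.len cs - 1) 1).foldl
      (fun r i => r ++ [PySem.List.pyGetD cs i ' ']) result
  result

def make_rotations (n : Int) : List Int :=
  let n_str := PySem.Int.toChars n
  let results : List (List Char) := [n_str]
  let results := (PySem.List.pyRange 0 (PySem.List.len n_str - 1) 1).foldl
      (fun rs i => rs ++ [make_rotation_port (PySem.List.pyGetD rs i [])]) results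
  -- for i in range(0, len(results)): results[i] = int(results[i])  — int() succeeds on Pre_ (digit strings)
  results.map (fun s => (PySem.Int.ofChars? s).getD 0)

-- ===== PORT B =====
def make_rotations_alt (n : Int) : List Int :=
  let s := PySem.Int.toChars n
  (PySem.List.pyRange 0 (PySem.List.len s) 1).map
    (fun i => (PySem.Int.ofChars?
        (PySem.List.slice s (some (-i)) none ++ PySem.List.slice s none (some (-i)))).getD 0)

-- ===== PRECONDITION & SPEC =====
-- Pre_ excludes negative n: there str(n) starts with '-', every proper rotation puts '-' in the
-- middle/end and int() raises ValueError in A (and in B alike).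
def Pre_make_rotations (n : Int) : Prop := 0 ≤ n
instance (n : Int) : Decidable (Pre_make_rotations n) := by unfold Pre_make_rotations; infer_instance
def pvWitness_make_rotations : Int := (123)
def Spec_make_rotations (n : Int) (out : List Int) : Prop := out = make_rotations_alt n
instance (n : Int) (out : List Int) : Decidable (Spec_make_rotations n out) := by unfold Spec_make_rotations; infer_instance

-- ===== CLAIM (what is proved, stated in full; the proofs are below) =====
def Claim_equal_make_rotations : Prop := ∀ (n : Int), Dom_make_rotations n → Pre_make_rotations n → Spec_make_rotations n (make_rotations n)

-- ===== LEMMAS AND PROOFS =====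

-- the j-th rotation of s, derived directly: drop (L-j) ++ take (L-j)
def rotK (s : List Char) (j : Nat) : List Char :=
  s.drop (s.length - j) ++ s.take (s.length - j)

theorem rotK_zero (s : List Char) : rotK s 0 = s := by
  simp [rotK]

theorem rotK_ne_nil (s : List Char) (hs : s ≠ []) (j : Nat) : rotK s j ≠ [] := by
  have h0 : 0 < s.length := List.length_pos_iff.mpr hs
  intro hcon
  simp only [rotK] at hcon
  rcases List.append_eq_nil_iff.mp hcon with ⟨h1, h2⟩
  rw [List.drop_eq_nil_iff] at h1
  rw [List.take_eq_nil_iff] at h2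
  rcases h2 with h | h
  · omega
  · exact hs h

theorem map_range_getD_take (cs : List Char) (m : Nat) (h : m ≤ cs.length) (d : Char) :
    (List.range m).map (fun k => cs.getD k d) = cs.take m := by
  apply List.ext_getElem
  · simp [h]
  · intro i h1 h2
    simp at h1 ⊢
    rw [List.getElem?_eq_getElem (by omega)]
    simp

theorem make_rotation_port_eq (cs : List Char) (h : cs ≠ []) :
    make_rotation_port cs = cs.getLast h :: cs.take (cs.length - 1) := by
  simp only [make_rotation_port, PySem.List.foldl_append_singleton_eq_map, PySem.List.len_eq]
  have h1 : 0 < cs.length := List.length_pos_iff.mpr h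
  have : ((cs.length : Int) - 1) = ((cs.length - 1 : Nat) : Int) := by omega
  rw [PySem.List.pyGetD_neg_one cs ' ' h, this, PySem.List.pyRange_zero_natCast, List.map_map]
  simp only [Function.comp_def, PySem.List.pyGetD_natCast]
  rw [map_range_getD_take cs _ (by omega) ' ']
  rfl

theorem rot_rotK (s : List Char) (j : Nat) (hj : j < s.length) (hne : rotK s j ≠ []) :
    (rotK s j).getLast hne :: (rotK s j).take ((rotK s j).length - 1) = rotK s (j + 1) := by
  have hlen : (rotK s j).length = s.length := by simp [rotK]
  have htne : s.take (s.length - j) ≠ [] := by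
    intro hcon
    rw [List.take_eq_nil_iff] at hcon
    rcases hcon with h | h
    · omega
    · simp [h] at hj
  have hgl? : (rotK s j).getLast? = some (s[s.length - j - 1]'(by omega)) := by
    rw [rotK, List.getLast?_append_of_ne_nil _ htne, List.getLast?_eq_some_getLast htne,
        List.getLast_eq_getElem]
    simp only [List.getElem_take, List.length_take]
    congr 2
    omega
  have hgl : (rotK s j).getLast hne = s[s.length - j - 1]'(by omega) := by
    have := List.getLast?_eq_some_getLast hne
    rw [hgl?] at this
    exact (Option.some.inj this).symm
  have htk : (rotK s j).take ((rotK s j).length - 1)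
      = s.drop (s.length - j) ++ s.take (s.length - j - 1) := by
    rw [hlen, rotK, List.take_append]
    congr 1
    · rw [List.take_of_length_le (by simp; omega)]
    · rw [List.take_take]
      congr 1
      simp only [List.length_drop]
      omega
  rw [hgl, htk, rotK]
  rw [List.drop_eq_getElem_cons (by omega : s.length - (j+1) < s.length)]
  have e2 : s.length - (j + 1) = s.length - j - 1 := by omega
  have e3 : s.length - j - 1 + 1 = s.length - j := by omega
  simp only [e2, e3, List.cons_append]

theorem loopA (s : List Char) (hs : s ≠ []) (m : Nat) (hm : m ≤ s.length - 1) :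
    (PySem.List.pyRange 0 (m : Int) 1).foldl
      (fun rs i => rs ++ [make_rotation_port (PySem.List.pyGetD rs i [])]) [s]
      = (List.range (m + 1)).map (rotK s) := by
  have h0 : 0 < s.length := List.length_pos_iff.mpr hs
  induction m with
  | zero =>
    rw [show ((0 : Nat) : Int) = 0 from rfl, PySem.List.pyRange_one_eq_nil le_rfl]
    simp [rotK_zero]
  | succ m ih =>
    rw [show ((m + 1 : Nat) : Int) = (m : Int) + 1 by push_cast; ring,
        PySem.List.pyRange_one_succ_right (by positivity), List.foldl_append,
        ih (by omega)]
    simp only [List.foldl_cons, List.foldl_nil, PySem.List.pyGetD_natCast]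
    rw [List.getD_eq_getElem _ _ (by simp)]
    have hg : ((List.range (m + 1)).map (rotK s))[m]'(by simp) = rotK s m := by
      simp
    rw [hg, make_rotation_port_eq _ (rotK_ne_nil s hs m),
        rot_rotK s m (by omega) (rotK_ne_nil s hs m)]
    simp [List.range_succ]

theorem main_strings (s : List Char) (hs : s ≠ []) :
    (PySem.List.pyRange 0 (PySem.List.len s - 1) 1).foldl
      (fun rs i => rs ++ [make_rotation_port (PySem.List.pyGetD rs i [])]) [s]
      = (List.range s.length).map (rotK s) := by
  have h0 : 0 < s.length := List.length_pos_iff.mpr hs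
  have he : PySem.List.len s - 1 = ((s.length - 1 : Nat) : Int) := by
    simp [PySem.List.len_eq]; omega
  rw [he, loopA s hs (s.length - 1) le_rfl, show s.length - 1 + 1 = s.length by omega]

theorem alt_strings (s : List Char) :
    (PySem.List.pyRange 0 (PySem.List.len s) 1).map
      (fun i => (PySem.Int.ofChars?
        (PySem.List.slice s (some (-i)) none ++ PySem.List.slice s none (some (-i)))).getD 0)
      = (List.range s.length).map (fun j => (PySem.Int.ofChars? (rotK s j)).getD 0) := by
  rw [PySem.List.len_eq, PySem.List.pyRange_zero_natCast, List.map_map]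
  apply List.map_congr_left
  intro k hk
  simp only [Function.comp_def]
  congr 1
  rcases Nat.eq_zero_or_pos k with hk0 | hk0
  · subst hk0
    rw [show (-(0 : Nat) : Int) = ((0 : Nat) : Int) from rfl,
        PySem.List.slice_from_natCast, PySem.List.slice_to_natCast]
    simp [rotK]
  · rw [PySem.List.slice_from_neg_natCast _ _ hk0, PySem.List.slice_to_neg_natCast _ _ hk0]
    rfl

theorem toDigitsCore_length_le (b f n : Nat) (l : List Char) :
    l.length ≤ (Nat.toDigitsCore b f n l).length := by
  induction f generalizing n l with
  | zero => simp [Nat.toDigitsCore]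
  | succ f ih =>
    rw [Nat.toDigitsCore]
    split
    · simp
    · exact le_trans (by simp) (ih _ _)

theorem toChars_ne_nil (n : Int) : PySem.Int.toChars n ≠ [] := by
  rw [PySem.Int.toChars]
  split
  · simp
  · rw [Nat.toDigits, Nat.toDigitsCore]
    split
    · simp
    · intro hcon
      have := toDigitsCore_length_le 10 n.toNat (n.toNat / 10) [Nat.digitChar (n.toNat % 10)]
      rw [hcon] at this
      simp at this

-- ===== VERDICT (by name: the statement is the Claim_ definition above) =====
theorem make_rotations_spec : Claim_equal_make_rotations := by
  intro n _ _
  show make_rotations n = make_rotations_alt n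
  simp only [make_rotations, make_rotations_alt]
  rw [main_strings _ (toChars_ne_nil n), alt_strings]
  simp [List.map_map, Function.comp]
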